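-- pv_equiv track=rewrite | github.com/shauray8/advent-of-code | striver/code.py | solve
-- ===== SOURCE A (Python) =====
-- def solve(n):
--     if sorted(set(n)) == sorted(n):
--         return "".join(n)
--     result = ""
--     ctr = 1
--     for i in range(len(n)):
--         if i+1<len(n) and n[i] == n[i+1]:
--             ctr+=1
--         else:
--             result += n[i]
--             if ctr>1 or (result[ctr-1]<="9" or result[ctr-1]>="1"):
--                 result += str(ctr)
--             ctr=1
--     return result
-- ===== SOURCE B (Python) =====
-- def solve(n):
--     if sorted(set(n)) == sorted(n):
--         return "".join(n)
--     ends = [i for i in range(len(n)) if i + 1 == len(n) or n[i] != n[i + 1]]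
--     return "".join(n[e] + str(e - s) for s, e in zip([-1] + ends, ends))
-- ===== Notes on version B (the rewrite author's own statement) =====
-- stated objective: alternative
-- what changed: The else branch no longer scans with a running counter and forward lookahead building the string as it goes: B first computes the list of run-end indices (a filtered range), then pairs each end with the previous end via zip([-1]+ends, ends) and formats each run as n[e]+str(e-s) by index differencing; the all-distinct guard is kept verbatim.
import Mathlib
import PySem

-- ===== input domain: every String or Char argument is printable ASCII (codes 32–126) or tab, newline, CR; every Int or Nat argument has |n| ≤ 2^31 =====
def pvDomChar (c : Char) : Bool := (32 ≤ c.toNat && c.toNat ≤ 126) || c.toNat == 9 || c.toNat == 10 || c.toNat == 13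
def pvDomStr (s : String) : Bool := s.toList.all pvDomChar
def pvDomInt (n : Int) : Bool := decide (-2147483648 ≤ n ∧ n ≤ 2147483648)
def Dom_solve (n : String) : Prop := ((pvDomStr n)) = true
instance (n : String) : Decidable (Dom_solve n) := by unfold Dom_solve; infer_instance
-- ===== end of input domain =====

-- B replaces A's stateful counter/lookahead scan by staged passes: collect all run-end
-- indices, then format each run by differencing consecutive ends; same return value.

-- ===== PORT A =====
-- loop body of A's 'for i in range(len(n))'; the string 'result' is carried as its List Char
def solveBody (cs : List Char) (st : List Char × Int) (i : Int) : List Char × Int :=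
  if i + 1 < (cs.length : Int) ∧ PySem.List.pyGet? cs i = PySem.List.pyGet? cs (i + 1) then
    (st.1, st.2 + 1)
  else
    -- result += n[i]  (i is always in range here, so getD never takes its default)
    let result := st.1 ++ [(PySem.List.pyGet? cs i).getD ' ']
    if 1 < st.2 ∨ ((PySem.List.pyGet? result (st.2 - 1)).getD ' ' ≤ '9'
                 ∨ '1' ≤ (PySem.List.pyGet? result (st.2 - 1)).getD ' ') then
      (result ++ PySem.Int.toChars st.2, 1)
    else (result, 1)

def solve (n : String) : String :=
  if PySem.List.sorted (PySem.Set.ofList n.toList) (fun x => x) false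
       = PySem.List.sorted n.toList (fun x => x) false then
    String.ofList n.toList          -- "".join(n)
  else
    String.ofList ((PySem.List.pyRange 0 (n.toList.length : Int) 1).foldl
                 (solveBody n.toList) ([], 1)).1

-- ===== PORT B =====
def solve_alt (n : String) : String :=
  if PySem.List.sorted (PySem.Set.ofList n.toList) (fun x => x) false
       = PySem.List.sorted n.toList (fun x => x) false then
    String.ofList n.toList          -- "".join(n)
  else
    -- ends = [i for i in range(len(n)) if i + 1 == len(n) or n[i] != n[i + 1]]
    let cs := n.toList
    let ends : List Int := (PySem.List.pyRange 0 (cs.length : Int) 1).filter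
      (fun i => decide (i + 1 = (cs.length : Int)) ||
                decide (PySem.List.pyGet? cs i ≠ PySem.List.pyGet? cs (i + 1)))
    -- "".join(n[e] + str(e - s) for s, e in zip([-1] + ends, ends))
    String.ofList ((((-1 : Int) :: ends).zip ends).flatMap
      (fun p => (PySem.List.pyGet? cs p.2).getD ' ' :: PySem.Int.toChars (p.2 - p.1)))

-- ===== PRECONDITION & SPEC =====
def Spec_solve (n : String) (out : String) : Prop := out = solve_alt n
instance (n : String) (out : String) : Decidable (Spec_solve n out) := by unfold Spec_solve; infer_instance

-- ===== CLAIM (what is proved, stated in full; the proofs are below) =====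
def Claim_equal_solve : Prop := ∀ (n : String), Dom_solve n → Spec_solve n (solve n)

-- ===== LEMMAS AND PROOFS =====

-- the inner 'if' of A always fires: any char is ≤ '9' or ≥ '1'
theorem pv_char_cond (x : Char) : x ≤ '9' ∨ '1' ≤ x := by
  rcases le_total x '9' with h | h
  · exact Or.inl h
  · exact Or.inr (le_trans (by decide) h)

-- length of the leading run of c in a list (proof-side reference)
def countRun (c : Char) : List Char → Nat
  | [] => 0
  | x :: xs => if x = c then 1 + countRun c xs else 0

-- proof-side reference: the run-length encoding as one flat list
def rle : List Char → List Char
  | [] => []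
  | c :: rest =>
      c :: (PySem.Int.toChars ((1 + countRun c rest : Nat) : Int)
            ++ rle (rest.drop (countRun c rest)))
  termination_by cs => cs.length
  decreasing_by simp

-- ---------- A side: the foldl loop equals rle ----------

-- A's loop as a structural recursion with one-character lookahead
def Arec (res : List Char) (ctr : Int) : List Char → List Char
  | [] => res
  | [c] => res ++ [c] ++ PySem.Int.toChars ctr
  | c :: c' :: rest' =>
      if c = c' then Arec res (ctr + 1) (c' :: rest')
      else Arec (res ++ [c] ++ PySem.Int.toChars ctr) 1 (c' :: rest')

theorem pv_loopA (cs : List Char) :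
    ∀ (k j : Nat) (res : List Char) (ctr : Int), cs.length ≤ j + k →
      ((PySem.List.pyRange (j : Int) (cs.length : Int) 1).foldl
          (solveBody cs) (res, ctr)).1 = Arec res ctr (cs.drop j) := by
  intro k
  induction k with
  | zero =>
      intro j res ctr h
      rw [PySem.List.pyRange_one_eq_nil (by exact_mod_cast h)]
      rw [List.drop_eq_nil_of_le (by omega)]
      rfl
  | succ k ih =>
      intro j res ctr h
      by_cases hj : cs.length ≤ j
      · rw [PySem.List.pyRange_one_eq_nil (by exact_mod_cast hj)]
        rw [List.drop_eq_nil_of_le hj]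
        rfl
      · rw [Nat.not_le] at hj
        rw [PySem.List.pyRange_one_cons (by exact_mod_cast hj)]
        rw [List.foldl_cons]
        have hdrop : cs.drop j = cs[j] :: cs.drop (j + 1) :=
          List.drop_eq_getElem_cons hj
        have hcast : (j : Int) + 1 = ((j + 1 : Nat) : Int) := by push_cast; ring
        by_cases hj1 : j + 1 < cs.length
        · have hdrop1 : cs.drop (j + 1) = cs[j + 1] :: cs.drop (j + 2) :=
            List.drop_eq_getElem_cons hj1
          by_cases heq : cs[j] = cs[j + 1]
          · -- equal lookahead: counter bumps
            have hcond : ((j : Int) + 1 < (cs.length : Int) ∧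
                PySem.List.pyGet? cs (j : Int) = PySem.List.pyGet? cs ((j : Int) + 1)) := by
              constructor
              · exact_mod_cast hj1
              · rw [hcast, PySem.List.pyGet?_natCast, PySem.List.pyGet?_natCast,
                    List.getElem?_eq_getElem (by omega), List.getElem?_eq_getElem hj1, heq]
            rw [show solveBody cs (res, ctr) (j : Int) = (res, ctr + 1) by
              simp only [solveBody, if_pos hcond]]
            rw [hcast, ih (j + 1) res (ctr + 1) (by omega)]
            rw [hdrop, hdrop1, Arec, if_pos heq, ← hdrop1]
          · -- different lookahead: emit
            have hcond : ¬ ((j : Int) + 1 < (cs.length : Int) ∧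
                PySem.List.pyGet? cs (j : Int) = PySem.List.pyGet? cs ((j : Int) + 1)) := by
              rintro ⟨-, h2⟩
              rw [hcast, PySem.List.pyGet?_natCast, PySem.List.pyGet?_natCast,
                  List.getElem?_eq_getElem (by omega), List.getElem?_eq_getElem hj1] at h2
              exact heq (by simpa using h2)
            rw [show solveBody cs (res, ctr) (j : Int)
                  = (res ++ [cs[j]] ++ PySem.Int.toChars ctr, 1) by
              simp only [solveBody, if_neg hcond]
              rw [PySem.List.pyGet?_natCast, List.getElem?_eq_getElem (by omega)]
              simp only [Option.getD_some]
              rw [if_pos (Or.inr (pv_char_cond _))]]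
            rw [hcast, ih (j + 1) _ 1 (by omega)]
            rw [hdrop, hdrop1, Arec, if_neg heq, ← hdrop1]
        · -- last index: emit
          have hlast : j + 1 = cs.length := by omega
          have hcond : ¬ ((j : Int) + 1 < (cs.length : Int) ∧
              PySem.List.pyGet? cs (j : Int) = PySem.List.pyGet? cs ((j : Int) + 1)) := by
            rintro ⟨h1, -⟩; omega
          rw [show solveBody cs (res, ctr) (j : Int)
                = (res ++ [cs[j]] ++ PySem.Int.toChars ctr, 1) by
            simp only [solveBody, if_neg hcond]
            rw [PySem.List.pyGet?_natCast, List.getElem?_eq_getElem (by omega)]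
            simp only [Option.getD_some]
            rw [if_pos (Or.inr (pv_char_cond _))]]
          rw [hcast, ih (j + 1) _ 1 (by omega)]
          rw [hdrop]
          rw [List.drop_eq_nil_of_le (by omega)]
          rfl

theorem pv_rle_nil : rle [] = [] := by simp [rle]

theorem pv_rle_cons (c : Char) (rest : List Char) :
    rle (c :: rest)
      = c :: (PySem.Int.toChars ((1 + countRun c rest : Nat) : Int)
              ++ rle (rest.drop (countRun c rest))) := by simp [rle]

-- Arec on a nonempty list emits the leading run, then behaves like rle
theorem pv_Arec_run : ∀ (rest : List Char) (c : Char) (res : List Char) (ctr : Int),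
    Arec res ctr (c :: rest)
      = res ++ [c] ++ PySem.Int.toChars (ctr + (countRun c rest : Int))
          ++ rle (rest.drop (countRun c rest)) := by
  intro rest
  induction rest with
  | nil =>
      intro c res ctr
      simp [Arec, countRun, pv_rle_nil]
  | cons c' rest' ih =>
      intro c res ctr
      by_cases heq : c = c'
      · rw [Arec, if_pos heq, ih c' res (ctr + 1)]
        subst heq
        rw [show countRun c (c :: rest') = 1 + countRun c rest' by
          simp [countRun]]
        have h1 : ctr + 1 + (countRun c rest' : Int)
             = ctr + ((1 + countRun c rest' : Nat) : Int) := by push_cast; ring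
        have h2 : (c :: rest').drop (1 + countRun c rest')
             = rest'.drop (countRun c rest') := by
          rw [Nat.add_comm]; rfl
        rw [h1, h2]
      · rw [Arec, if_neg heq, ih c' _ 1]
        rw [show countRun c (c' :: rest') = 0 by
          simp [countRun]; exact fun h => absurd h.symm heq]
        simp only [List.drop_zero]
        rw [pv_rle_cons]
        simp [List.append_assoc]

theorem pv_Arec_eq_rle (cs : List Char) : Arec [] 1 cs = rle cs := by
  cases cs with
  | nil => rw [pv_rle_nil]; rfl
  | cons c rest =>
      rw [pv_Arec_run, pv_rle_cons]
      simp

-- ---------- B side: ends/zip formatting equals rle ----------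

-- Nat-level version of Source B's ends list
def EN (cs : List Char) : List Nat :=
  (List.range cs.length).filter (fun i => decide (i + 1 = cs.length) || decide (cs[i]? ≠ cs[i + 1]?))

-- Nat-level version of Source B's zip/format pass
def goPieces (cs : List Char) (prev : Int) : List Nat → List Char
  | [] => []
  | e :: es => (cs[e]?.getD ' ') :: PySem.Int.toChars ((e : Int) - prev) ++ goPieces cs (e : Int) es

theorem pv_EN_shift (x : Char) (xs : List Char) :
    EN (x :: xs) = (if xs = [] ∨ xs[0]? ≠ some x then [0] else []) ++ (EN xs).map (· + 1) := by
  unfold EN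
  rw [List.length_cons, List.range_succ_eq_map, List.filter_cons, List.filter_map]
  have hpred : ((fun i => decide (i + 1 = xs.length) || decide (xs[i]? ≠ xs[i + 1]?)))
      = ((fun i => decide (i + 1 = xs.length + 1) || decide ((x :: xs)[i]? ≠ (x :: xs)[i + 1]?)) ∘ Nat.succ) := by
    funext i
    simp only [Function.comp, List.getElem?_cons_succ, Nat.succ_eq_add_one]
    congr 1
    simp only [decide_eq_decide]
    omega
  rw [← hpred]
  rw [show (List.map Nat.succ : List Nat → List Nat) = List.map (fun i : Nat => i + 1) from rfl]
  by_cases h : xs = [] ∨ xs[0]? ≠ some x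
  · rw [if_pos h]
    have hc : (decide (0 + 1 = xs.length + 1) || decide ((x :: xs)[0]? ≠ (x :: xs)[0 + 1]?)) = true := by
      rcases h with h | h
      · subst h; simp
      · simp only [List.getElem?_cons_zero, List.getElem?_cons_succ]
        simp only [Bool.or_eq_true, decide_eq_true_eq]
        exact Or.inr (fun he => h (by rw [he]))
    rw [hc]
    rfl
  · rw [if_neg h]
    push Not at h
    obtain ⟨hne, h0⟩ := h
    have hc : (decide (0 + 1 = xs.length + 1) || decide ((x :: xs)[0]? ≠ (x :: xs)[0 + 1]?)) = false := by
      simp only [List.getElem?_cons_zero, List.getElem?_cons_succ, h0]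
      simp only [Bool.or_eq_false_iff, decide_eq_false_iff_not]
      constructor
      · cases xs with
        | nil => exact absurd rfl hne
        | cons a l => simp
      · simp
    rw [hc]
    rfl

theorem pv_countRun_mem (c : Char) : ∀ (rest : List Char) (j : Nat),
    j < countRun c rest → rest[j]? = some c := by
  intro rest
  induction rest with
  | nil => intro j h; simp [countRun] at h
  | cons x xs ih =>
      intro j h
      rw [countRun] at h
      by_cases hx : x = c
      · rw [if_pos hx] at h
        cases j with
        | zero => simp [hx]
        | succ j => simpa using ih j (by omega)
      · rw [if_neg hx] at h; omega

-- Source B's ends list of c::rest: the first run's end, then the suffix's ends shifted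
theorem pv_EN_run : ∀ (rest : List Char) (c : Char),
    EN (c :: rest)
      = countRun c rest :: (EN (rest.drop (countRun c rest))).map (· + (countRun c rest + 1)) := by
  intro rest
  induction rest with
  | nil =>
      intro c
      rw [pv_EN_shift]
      simp [EN, countRun]
  | cons d rest2 ih =>
      intro c
      by_cases hd : d = c
      · subst hd
        rw [pv_EN_shift]
        have h0 : ¬ ((d :: rest2) = [] ∨ (d :: rest2)[0]? ≠ some d) := by simp
        rw [if_neg h0, List.nil_append, ih d]
        rw [show countRun d (d :: rest2) = 1 + countRun d rest2 by simp [countRun]]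
        rw [List.map_cons, List.map_map]
        have hdrop : (d :: rest2).drop (1 + countRun d rest2) = rest2.drop (countRun d rest2) := by
          rw [Nat.add_comm]; rfl
        rw [hdrop]
        congr 1
        · omega
        · congr 1
          funext j
          simp only [Function.comp]
          omega
      · rw [pv_EN_shift]
        rw [if_pos (by simp; exact fun he => hd he)]
        rw [show countRun c (d :: rest2) = 0 by
          simp [countRun]; exact fun h => hd h]
        simp

-- shifting all indices by m moves goPieces into the suffix
theorem pv_goPieces_shift : ∀ (es : List Nat) (cs rest' : List Char) (m : Nat) (p : Int),
    cs.drop m = rest' →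
    goPieces cs (p + (m : Int)) (es.map (· + m)) = goPieces rest' p es := by
  intro es
  induction es with
  | nil => intro cs rest' m p h; rfl
  | cons e es ih =>
      intro cs rest' m p h
      simp only [List.map_cons, goPieces]
      have hget : cs[e + m]? = rest'[e]? := by
        rw [← h, List.getElem?_drop, Nat.add_comm]
      rw [hget]
      have hdiff : ((e + m : Nat) : Int) - (p + (m : Int)) = (e : Int) - p := by push_cast; ring
      rw [hdiff]
      have hrec : ((e + m : Nat) : Int) = (e : Int) + (m : Int) := by push_cast; ring
      rw [hrec, ih cs rest' m (e : Int) h]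

theorem pv_goPieces_eq_rle : ∀ (cs : List Char), goPieces cs (-1) (EN cs) = rle cs := by
  intro cs
  induction cs using rle.induct with
  | case1 => simp [EN, goPieces, pv_rle_nil]
  | case2 c rest ih =>
      rw [pv_EN_run, pv_rle_cons]
      set k := countRun c rest with hk
      simp only [goPieces]
      have hget : (c :: rest)[k]? = some c := by
        cases hk' : k with
        | zero => simp
        | succ j =>
            rw [List.getElem?_cons_succ]
            exact pv_countRun_mem c rest j (by omega)
      rw [hget]
      have hdiff : ((k : Nat) : Int) - (-1) = ((1 + k : Nat) : Int) := by push_cast; ring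
      rw [hdiff]
      have hshift : goPieces (c :: rest) (k : Int) ((EN (rest.drop k)).map (· + (k + 1)))
          = goPieces (rest.drop k) (-1) (EN (rest.drop k)) := by
        have := pv_goPieces_shift (EN (rest.drop k)) (c :: rest) (rest.drop k) (k + 1) (-1) rfl
        have hp : (-1 : Int) + ((k + 1 : Nat) : Int) = (k : Int) := by push_cast; ring
        rw [hp] at this
        exact this
      rw [hshift, ih]
      simp

-- the port's Int-valued ends list is the Nat-level EN, cast
theorem pv_ends_cast (cs : List Char) :
    (PySem.List.pyRange 0 (cs.length : Int) 1).filter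
      (fun i => decide (i + 1 = (cs.length : Int)) ||
                decide (PySem.List.pyGet? cs i ≠ PySem.List.pyGet? cs (i + 1)))
    = (EN cs).map (fun i : Nat => (i : Int)) := by
  rw [PySem.List.pyRange_one]
  rw [show ((cs.length : Int) - 0).toNat = cs.length from by simp]
  rw [show (fun k : Nat => (0 : Int) + (k : Int)) = (fun i : Nat => (i : Int)) from
    funext fun k => by ring]
  rw [List.filter_map]
  unfold EN
  have hp : ((fun i => decide (i + 1 = (cs.length : Int)) ||
                decide (PySem.List.pyGet? cs i ≠ PySem.List.pyGet? cs (i + 1)))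
              ∘ (fun i : Nat => (i : Int)))
      = (fun i => decide (i + 1 = cs.length) || decide (cs[i]? ≠ cs[i + 1]?)) := by
    funext i
    simp only [Function.comp]
    congr 1
    · simp only [decide_eq_decide]
      constructor
      · intro h; exact_mod_cast h
      · intro h; exact_mod_cast h
    · rw [show ((i : Int) + 1) = ((i + 1 : Nat) : Int) by push_cast; ring]
      rw [PySem.List.pyGet?_natCast, PySem.List.pyGet?_natCast]
  rw [hp]

-- the port's zip/flatMap pass is goPieces
theorem pv_zip_goPieces (cs : List Char) : ∀ (es : List Nat) (p : Int),
    ((p :: es.map (fun i : Nat => (i : Int))).zip (es.map (fun i : Nat => (i : Int)))).flatMap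
      (fun q => (PySem.List.pyGet? cs q.2).getD ' ' :: PySem.Int.toChars (q.2 - q.1))
    = goPieces cs p es := by
  intro es
  induction es with
  | nil => intro p; rfl
  | cons e es ih =>
      intro p
      simp only [List.map_cons, List.zip_cons_cons, List.flatMap_cons, goPieces,
        PySem.List.pyGet?_natCast]
      rw [ih (e : Int)]

-- ===== VERDICT (by name: the statement is the Claim_ definition above) =====
theorem solve_spec : Claim_equal_solve := by
  intro n _
  unfold Spec_solve solve solve_alt
  split_ifs with h
  · rfl
  · congr 1
    rw [pv_ends_cast, pv_zip_goPieces, pv_goPieces_eq_rle]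
    have := pv_loopA n.toList n.toList.length 0 [] 1 (by omega)
    simpa using this.trans (pv_Arec_eq_rle n.toList)
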